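-- pv_equiv track=rewrite | github.com/TaeTanakrit0089/PSCP-Code | Week12/03.HorizontalHistogram.py | do_text_thing
-- ===== SOURCE A (Python) =====
-- def do_text_thing(temp):
--     '''Saul Goodman'''
--     text, data_lower, data_upper = [], [], []
--     for i in temp:
--         text.append(i)
--         if i.islower() and i not in data_lower:
--             data_lower.append(i)
--         elif i.isupper() and i not in data_upper:
--             data_upper.append(i)
--     data_lower.sort()
--     data_upper.sort()
--     return data_lower+data_upper
-- ===== SOURCE B (Python) =====
-- def do_text_thing(temp):
--     '''Saul Goodman'''
--     return [c for c in 'abcdefghijklmnopqrstuvwxyzABCDEFGHIJKLMNOPQRSTUVWXYZ'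
--             if c in temp]
-- ===== Notes on version B (the rewrite author's own statement) =====
-- stated objective: faster
-- what changed: Instead of scanning the input with per-element list-membership dedup followed by two sorts, B scans the fixed 52-letter alphabet in lower-then-upper order and keeps each letter that occurs in the input, so no dedup structure and no sort are needed at all.
import Mathlib
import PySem

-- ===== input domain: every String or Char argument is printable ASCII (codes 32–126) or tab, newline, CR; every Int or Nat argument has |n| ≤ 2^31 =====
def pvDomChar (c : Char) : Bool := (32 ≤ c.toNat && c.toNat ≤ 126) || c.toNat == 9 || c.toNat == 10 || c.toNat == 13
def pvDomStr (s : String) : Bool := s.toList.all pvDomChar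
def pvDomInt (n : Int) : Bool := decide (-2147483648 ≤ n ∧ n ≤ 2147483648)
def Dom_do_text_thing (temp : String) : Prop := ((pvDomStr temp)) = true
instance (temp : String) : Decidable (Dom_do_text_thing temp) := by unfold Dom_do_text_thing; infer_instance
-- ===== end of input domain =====

-- B replaces A's scan-input / dedup-by-list-membership / double-sort algorithm by a single
-- scan of the fixed 52-letter alphabet (lower then upper), keeping letters that occur in the
-- input: the alphabet order makes both dedup and sorting unnecessary (alternative algorithm).
-- Python's 1-char strings are modelled as Char internally and mapped to Strings at return.

-- ===== PORT A =====
-- the loop body of A (classify i into data_lower/data_upper with list-membership dedup)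
def pvStepA (acc : List Char × List Char) (i : Char) : List Char × List Char :=
  if PySem.Chars.islower i && !(acc.1.contains i) then (acc.1 ++ [i], acc.2)
  else if PySem.Chars.isupper i && !(acc.2.contains i) then (acc.1, acc.2 ++ [i])
  else acc

-- literal port of A (the `text` accumulator is omitted: it is appended to but never read)
def do_text_thing (temp : String) : List String :=
  let st := temp.toList.foldl pvStepA ([], [])
  (PySem.List.sorted st.1 (fun c => c) false ++ PySem.List.sorted st.2 (fun c => c) false).map
    (fun c => String.ofList [c])

-- ===== PORT B =====
-- the alphabet literal of Source B, as a list of its characters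
def pvLowerAlpha : List Char :=
  ['a','b','c','d','e','f','g','h','i','j','k','l','m','n','o','p','q','r','s','t','u','v','w','x','y','z']
def pvUpperAlpha : List Char :=
  ['A','B','C','D','E','F','G','H','I','J','K','L','M','N','O','P','Q','R','S','T','U','V','W','X','Y','Z']

def do_text_thing_alt (temp : String) : List String :=
  ((pvLowerAlpha ++ pvUpperAlpha).filter (fun c => temp.toList.contains c)).map
    (fun c => String.ofList [c])

-- ===== PRECONDITION & SPEC =====
def Spec_do_text_thing (temp : String) (out : List String) : Prop := out = do_text_thing_alt temp
instance (temp : String) (out : List String) : Decidable (Spec_do_text_thing temp out) := by unfold Spec_do_text_thing; infer_instance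

-- ===== CLAIM (what is proved, stated in full; the proofs are below) =====
def Claim_equal_do_text_thing : Prop := ∀ (temp : String), Dom_do_text_thing temp → Spec_do_text_thing temp (do_text_thing temp)

-- ===== LEMMAS AND PROOFS =====

-- an ASCII lowercase letter (PySem's islower range) is never uppercase
theorem pv_islower_not_isupper (c : Char) (h : PySem.Chars.islower c = true) :
    PySem.Chars.isupper c = false := by
  simp [PySem.Chars.islower, Char.le_def] at h
  simp [PySem.Chars.isupper, Char.le_def]
  intro _
  have h1 := h.1
  rw [UInt32.le_iff_toNat_le] at h1
  rw [UInt32.lt_iff_toNat_lt]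
  have e1 : (97:UInt32).toNat = 97 := rfl
  have e2 : (90:UInt32).toNat = 90 := rfl
  omega

-- A's loop computes exactly the two first-occurrence dedups of the two filtered lists
theorem pv_loop_eq (l : List Char) (dl du : List Char) :
    l.foldl pvStepA (dl, du)
    = ((l.filter PySem.Chars.islower).foldl PySem.Set.add dl,
       (l.filter PySem.Chars.isupper).foldl PySem.Set.add du) := by
  induction l generalizing dl du with
  | nil => rfl
  | cons i t ih =>
    by_cases hl : PySem.Chars.islower i = true
    · have hu := pv_islower_not_isupper i hl
      by_cases hc : i ∈ dl
      · have hstep : pvStepA (dl, du) i = (dl, du) := by simp [pvStepA, hl, hu, hc]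
        have hadd : PySem.Set.add dl i = dl := by
          simp [PySem.Set.add, PySem.Set.contains, hc]
        rw [List.foldl_cons, hstep, ih, List.filter_cons, List.filter_cons]
        simp [hl, hu, hadd]
      · have hstep : pvStepA (dl, du) i = (dl ++ [i], du) := by simp [pvStepA, hl, hc]
        have hadd : PySem.Set.add dl i = dl ++ [i] := by
          simp [PySem.Set.add, PySem.Set.contains, hc]
        rw [List.foldl_cons, hstep, ih, List.filter_cons, List.filter_cons]
        simp [hl, hu, hadd]
    · by_cases hu : PySem.Chars.isupper i = true
      · by_cases hc : i ∈ du
        · have hstep : pvStepA (dl, du) i = (dl, du) := by simp [pvStepA, hl, hu, hc]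
          have hadd : PySem.Set.add du i = du := by
            simp [PySem.Set.add, PySem.Set.contains, hc]
          rw [List.foldl_cons, hstep, ih, List.filter_cons, List.filter_cons]
          simp [hl, hu, hadd]
        · have hstep : pvStepA (dl, du) i = (dl, du ++ [i]) := by simp [pvStepA, hl, hu, hc]
          have hadd : PySem.Set.add du i = du ++ [i] := by
            simp [PySem.Set.add, PySem.Set.contains, hc]
          rw [List.foldl_cons, hstep, ih, List.filter_cons, List.filter_cons]
          simp [hl, hu, hadd]
      · have hstep : pvStepA (dl, du) i = (dl, du) := by simp [pvStepA, hl, hu]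
        rw [List.foldl_cons, hstep, ih, List.filter_cons, List.filter_cons]
        simp [hl, hu]

-- Char.toNat is injective
theorem pv_char_toNat_inj {a b : Char} (h : a.toNat = b.toNat) : a = b := by
  have := congrArg Char.ofNat h
  rwa [Char.ofNat_toNat, Char.ofNat_toNat] at this

-- membership in the literal alphabet halves coincides with PySem's islower/isupper tests
theorem pv_mem_lower (c : Char) : c ∈ pvLowerAlpha ↔ PySem.Chars.islower c = true := by
  constructor
  · intro h; fin_cases h <;> decide
  · intro h
    simp [PySem.Chars.islower, Char.le_def, UInt32.le_iff_toNat_le] at h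
    have hmaps : pvLowerAlpha.map Char.toNat = List.range' 97 26 := by decide
    have hmem : c.toNat ∈ pvLowerAlpha.map Char.toNat := by
      rw [hmaps]; rw [List.mem_range'_1]
      omega
    obtain ⟨d, hd, hdn⟩ := List.mem_map.mp hmem
    rwa [pv_char_toNat_inj hdn] at hd

theorem pv_mem_upper (c : Char) : c ∈ pvUpperAlpha ↔ PySem.Chars.isupper c = true := by
  constructor
  · intro h; fin_cases h <;> decide
  · intro h
    simp [PySem.Chars.isupper, Char.le_def, UInt32.le_iff_toNat_le] at h
    have hmaps : pvUpperAlpha.map Char.toNat = List.range' 65 26 := by decide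
    have hmem : c.toNat ∈ pvUpperAlpha.map Char.toNat := by
      rw [hmaps]; rw [List.mem_range'_1]
      omega
    obtain ⟨d, hd, hdn⟩ := List.mem_map.mp hmem
    rwa [pv_char_toNat_inj hdn] at hd

-- sorting the set of the p-filtered input equals filtering a strictly increasing
-- enumeration `alpha` of p by occurrence in the input
theorem pv_sorted_eq_alpha_filter (l alpha : List Char) (p : Char → Bool)
    (hmem : ∀ c, c ∈ alpha ↔ p c = true) (hpw : alpha.Pairwise (· < ·)) :
    PySem.List.sorted (PySem.Set.ofList (l.filter p)) (fun c => c) false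
      = alpha.filter (fun c => l.contains c) := by
  apply PySem.List.sorted_eq_of_perm_of_pairwise_lt
  · rw [List.perm_ext_iff_of_nodup]
    · intro a
      simp only [List.mem_filter, PySem.Set.mem_ofList, List.contains_iff_mem,
        hmem a]
      exact and_comm
    · exact (hpw.filter _).imp ne_of_lt
    · exact PySem.Set.nodup_ofList _
  · exact hpw.filter _

-- ===== VERDICT (by name: the statement is the Claim_ definition above) =====
theorem do_text_thing_spec : Claim_equal_do_text_thing := by
  intro temp _
  unfold Spec_do_text_thing do_text_thing do_text_thing_alt
  rw [pv_loop_eq, ← PySem.Set.ofList_eq_foldl, ← PySem.Set.ofList_eq_foldl,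
    List.filter_append, List.map_append,
    pv_sorted_eq_alpha_filter _ _ _ pv_mem_lower (by decide),
    pv_sorted_eq_alpha_filter _ _ _ pv_mem_upper (by decide),
    List.map_append]
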